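-- pv_equiv track=rewrite | github.com/elliotttmiller/ConstructAI | constructai/ai/utilities.py | _get_safety_requirements
-- ===== SOURCE A (Python) =====
-- from typing import Dict, List, Any, Optional, Tuple
--
-- def _get_safety_requirements(analysis_results: Dict[str, Any]) -> List[str]:
--     """Extract safety requirements based on project scope."""
--     requirements = [
--         "OSHA 1926 - Construction Standards",
--         "Fall protection for work above 6 feet",
--         "Personal protective equipment (PPE)",
--         "Hazard communication program"
--     ]
--
--     # Add division-specific requirements
--     divisions = analysis_results.get("divisions_summary", {})
--
--     if "03" in divisions:  # Concrete
--         requirements.extend([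
--             "Concrete/masonry work safety",
--             "Formwork inspection requirements"
--         ])
--
--     if "05" in divisions:  # Metals
--         requirements.extend([
--             "Steel erection safety (OSHA 1926 Subpart R)",
--             "Crane and rigging safety"
--         ])
--
--     if any(div in divisions for div in ["22", "23", "26"]):  # MEP
--         requirements.extend([
--             "Electrical safety (NFPA 70E)",
--             "Confined space entry procedures",
--             "Lockout/tagout procedures"
--         ])
--
--     return requirements
-- ===== SOURCE B (Python) =====
-- CATEGORY = {"03": 0, "05": 1, "22": 2, "23": 2, "26": 2}
--
-- EXTRAS = [
--     ["Concrete/masonry work safety",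
--      "Formwork inspection requirements"],
--     ["Steel erection safety (OSHA 1926 Subpart R)",
--      "Crane and rigging safety"],
--     ["Electrical safety (NFPA 70E)",
--      "Confined space entry procedures",
--      "Lockout/tagout procedures"],
-- ]
--
-- def _get_safety_requirements(analysis_results):
--     """Extract safety requirements based on project scope."""
--     divisions = analysis_results.get("divisions_summary", {})
--     # One pass over the division codes, marking which requirement
--     # categories are triggered (instead of membership tests per rule).
--     flags = [False, False, False]
--     for code in divisions:
--         cat = CATEGORY.get(code)
--         if cat is not None:
--             flags[cat] = True
--     requirements = [
--         "OSHA 1926 - Construction Standards",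
--         "Fall protection for work above 6 feet",
--         "Personal protective equipment (PPE)",
--         "Hazard communication program",
--     ]
--     for cat, present in enumerate(flags):
--         if present:
--             requirements.extend(EXTRAS[cat])
--     return requirements
-- ===== Notes on version B (the rewrite author's own statement) =====
-- stated objective: alternative
-- what changed: Inverts the traversal: instead of three membership tests scanning the divisions dict per rule, B makes one pass over the division codes, classifying each via a code-to-category map into three flags, then emits the flagged requirement blocks in order.
import Mathlib
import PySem

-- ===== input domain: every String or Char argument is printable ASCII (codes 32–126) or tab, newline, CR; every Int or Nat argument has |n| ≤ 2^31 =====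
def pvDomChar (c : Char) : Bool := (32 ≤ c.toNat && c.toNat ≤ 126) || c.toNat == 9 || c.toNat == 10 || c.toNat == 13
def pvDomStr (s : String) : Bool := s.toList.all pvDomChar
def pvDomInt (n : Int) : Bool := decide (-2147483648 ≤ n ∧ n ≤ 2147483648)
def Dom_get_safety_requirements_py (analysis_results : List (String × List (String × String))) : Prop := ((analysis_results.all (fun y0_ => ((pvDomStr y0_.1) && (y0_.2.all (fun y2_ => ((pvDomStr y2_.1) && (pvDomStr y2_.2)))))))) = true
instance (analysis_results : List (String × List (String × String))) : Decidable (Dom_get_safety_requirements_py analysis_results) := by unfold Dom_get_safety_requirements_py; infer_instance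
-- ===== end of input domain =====

-- B inverts the traversal: one classifying pass over the division codes sets three category flags, then the flagged requirement blocks are emitted (alternative decomposition, same cost).


-- ===== PORT A =====
def get_safety_requirements_py (analysis_results : List (String × List (String × String))) : List String :=
  let requirements : List String := [
    "OSHA 1926 - Construction Standards",
    "Fall protection for work above 6 feet",
    "Personal protective equipment (PPE)",
    "Hazard communication program"]
  let divisions : List (String × String) :=
    (PySem.Dict.mk analysis_results).getD "divisions_summary" []
  let requirements :=
    if (PySem.Dict.mk divisions).contains "03" then
      requirements ++ ["Concrete/masonry work safety",
                       "Formwork inspection requirements"]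
    else requirements
  let requirements :=
    if (PySem.Dict.mk divisions).contains "05" then
      requirements ++ ["Steel erection safety (OSHA 1926 Subpart R)",
                       "Crane and rigging safety"]
    else requirements
  let requirements :=
    if (["22", "23", "26"].any (fun div => (PySem.Dict.mk divisions).contains div)) then
      requirements ++ ["Electrical safety (NFPA 70E)",
                       "Confined space entry procedures",
                       "Lockout/tagout procedures"]
    else requirements
  requirements

-- ===== PORT B =====
-- B: classify each division code once via CATEGORY, set flags, then emit flagged blocks.
def pvCategory : PySem.Dict String Int :=
  PySem.Dict.mk [("03", 0), ("05", 1), ("22", 2), ("23", 2), ("26", 2)]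

def pvExtras : List (List String) := [
  ["Concrete/masonry work safety",
   "Formwork inspection requirements"],
  ["Steel erection safety (OSHA 1926 Subpart R)",
   "Crane and rigging safety"],
  ["Electrical safety (NFPA 70E)",
   "Confined space entry procedures",
   "Lockout/tagout procedures"]]

def get_safety_requirements_py_alt (analysis_results : List (String × List (String × String))) : List String :=
  let divisions : List (String × String) :=
    (PySem.Dict.mk analysis_results).getD "divisions_summary" []
  -- for code in divisions: flags[CATEGORY[code]] = True when the code is categorized
  let flags : List Bool :=
    divisions.foldl
      (fun fl p =>
        match pvCategory.get? p.1 with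
        | some cat => PySem.List.pySetD fl cat true
        | none => fl)
      [false, false, false]
  -- for cat, present in enumerate(flags): if present: requirements.extend(EXTRAS[cat])
  (PySem.List.enumerate flags).foldl
    (fun req e =>
      if e.2 then req ++ PySem.List.pyGetD pvExtras e.1 []
      else req)
    ["OSHA 1926 - Construction Standards",
     "Fall protection for work above 6 feet",
     "Personal protective equipment (PPE)",
     "Hazard communication program"]

-- ===== PRECONDITION & SPEC =====
def Spec_get_safety_requirements_py (analysis_results : List (String × List (String × String))) (out : List String) : Prop := out = get_safety_requirements_py_alt analysis_results
instance (analysis_results : List (String × List (String × String))) (out : List String) : Decidable (Spec_get_safety_requirements_py analysis_results out) := by unfold Spec_get_safety_requirements_py; infer_instance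

-- ===== CLAIM (what is proved, stated in full; the proofs are below) =====
def Claim_equal_get_safety_requirements_py : Prop := ∀ (analysis_results : List (String × List (String × String))), Dom_get_safety_requirements_py analysis_results → Spec_get_safety_requirements_py analysis_results (get_safety_requirements_py analysis_results)

-- ===== LEMMAS AND PROOFS =====

theorem pv_any_or (l : List (String × String)) (p q : (String × String) → Bool) :
    (l.any fun x => p x || q x) = (l.any p || l.any q) := by
  induction l with
  | nil => rfl
  | cons h t ih => simp [ih]; cases p h <;> cases q h <;> simp

-- membership in a literal dict is a scan of the underlying pair list
theorem pv_contains_any (ds : List (String × String)) (k : String) :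
    (PySem.Dict.mk ds).contains k = ds.any (fun p => p.1 == k) := by
  simp [PySem.Dict.contains_mk]

-- the flag-setting pass computes exactly the three membership tests A makes
theorem pv_flags_fold (ds : List (String × String)) (a b c : Bool) :
    ds.foldl
      (fun fl p =>
        match pvCategory.get? p.1 with
        | some cat => PySem.List.pySetD fl cat true
        | none => fl)
      [a, b, c]
    = [a || ds.any (fun p => p.1 == "03"),
       b || ds.any (fun p => p.1 == "05"),
       c || ds.any (fun p => p.1 == "22" || p.1 == "23" || p.1 == "26")] := by
  induction ds generalizing a b c with
  | nil => simp
  | cons p t ih =>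
    simp only [List.foldl_cons, List.any_cons]
    by_cases h03 : p.1 = "03"
    · rw [h03, show (match pvCategory.get? "03" with | some cat => PySem.List.pySetD [a, b, c] cat true | none => [a, b, c]) = [true, b, c] from rfl]
      simp [ih]
    · by_cases h05 : p.1 = "05"
      · rw [h05, show (match pvCategory.get? "05" with | some cat => PySem.List.pySetD [a, b, c] cat true | none => [a, b, c]) = [a, true, c] from rfl]
        simp [ih]
      · by_cases h22 : p.1 = "22"
        · rw [h22, show (match pvCategory.get? "22" with | some cat => PySem.List.pySetD [a, b, c] cat true | none => [a, b, c]) = [a, b, true] from rfl]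
          simp [ih]
        · by_cases h23 : p.1 = "23"
          · rw [h23, show (match pvCategory.get? "23" with | some cat => PySem.List.pySetD [a, b, c] cat true | none => [a, b, c]) = [a, b, true] from rfl]
            simp [ih]
          · by_cases h26 : p.1 = "26"
            · rw [h26, show (match pvCategory.get? "26" with | some cat => PySem.List.pySetD [a, b, c] cat true | none => [a, b, c]) = [a, b, true] from rfl]
              simp [ih]
            · rw [show pvCategory.get? p.1 = none from by
                simp [pvCategory, PySem.Dict.get?,
                      Ne.symm h03, Ne.symm h05, Ne.symm h22, Ne.symm h23, Ne.symm h26]]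
              simp only [ih, show (p.1 == "03") = false from by simp [h03],
                         show (p.1 == "05") = false from by simp [h05],
                         show (p.1 == "22") = false from by simp [h22],
                         show (p.1 == "23") = false from by simp [h23],
                         show (p.1 == "26") = false from by simp [h26],
                         Bool.false_or]

-- ===== VERDICT (by name: the statement is the Claim_ definition above) =====
theorem get_safety_requirements_py_spec : Claim_equal_get_safety_requirements_py := by
  intro analysis_results _
  unfold Spec_get_safety_requirements_py get_safety_requirements_py get_safety_requirements_py_alt
  dsimp only
  rw [pv_flags_fold]
  simp only [Bool.false_or, PySem.List.enumerate_cons, PySem.List.enumerate_nil,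
             List.foldl_cons, List.foldl_nil,
             pv_contains_any, List.any_cons, List.any_nil, Bool.or_false,
             pv_any_or, Bool.or_assoc,
             show PySem.List.pyGetD pvExtras 0 ([] : List String) = ["Concrete/masonry work safety", "Formwork inspection requirements"] from rfl,
             show PySem.List.pyGetD pvExtras (0 + 1) ([] : List String) = ["Steel erection safety (OSHA 1926 Subpart R)", "Crane and rigging safety"] from rfl,
             show PySem.List.pyGetD pvExtras (0 + 1 + 1) ([] : List String) = ["Electrical safety (NFPA 70E)", "Confined space entry procedures", "Lockout/tagout procedures"] from rfl]
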